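-- pv_equiv track=rewrite | github.com/mateuszk098/python-learning-notes | algorithms_and_data_structures/algorithms/hidden_word_in_text.py | is_hidden_word_in_text
-- ===== SOURCE A (Python) =====
-- def is_hidden_word_in_text(text, word):
--     """Return True if the given text contains a hidden word, otherwise return False."""
--     word_len, text_len = len(word), len(text)
--     if word_len > text_len:
--         return False
--
--     text_lst = list(text)
--     for letter in word:  # One should have as many removes as there are letters in word.
--         try:
--             text_lst.remove(letter)
--         except ValueError:
--             return False
--
--     return True
-- ===== SOURCE B (Python) =====
-- def is_hidden_word_in_text(text, word):
--     """Return True if the given text contains a hidden word, otherwise return False."""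
--     return all(word.count(c) <= text.count(c) for c in set(word))
-- ===== Notes on version B (the rewrite author's own statement) =====
-- stated objective: idiomatic
-- what changed: B replaces A's element-by-element consumption of a mutable copy of text (list.remove inside try/except, plus a length guard) by a per-distinct-character frequency comparison: all(word.count(c) <= text.count(c) for c in set(word)).
import Mathlib
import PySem

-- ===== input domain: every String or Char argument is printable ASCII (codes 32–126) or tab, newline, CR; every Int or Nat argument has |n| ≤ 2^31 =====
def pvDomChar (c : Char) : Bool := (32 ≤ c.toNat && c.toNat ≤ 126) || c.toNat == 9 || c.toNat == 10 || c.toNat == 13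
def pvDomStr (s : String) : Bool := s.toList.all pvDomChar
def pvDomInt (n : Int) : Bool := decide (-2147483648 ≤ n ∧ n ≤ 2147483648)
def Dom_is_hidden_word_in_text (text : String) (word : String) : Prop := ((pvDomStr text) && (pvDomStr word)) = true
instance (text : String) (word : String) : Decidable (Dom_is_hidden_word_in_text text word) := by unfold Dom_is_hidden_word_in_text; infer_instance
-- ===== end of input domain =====

-- B replaces A's element-by-element consumption of a mutable copy of text (list.remove in
-- try/except plus a length guard) by a per-distinct-character count comparison (idiomatic).


-- ===== PORT A =====
-- the 'for letter in word' loop: text_lst.remove(letter) (remove? = none ⇒ ValueError ⇒ return False)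
def pvRemoveLoop (w : List Char) (text_lst : List Char) : Bool :=
  match w with
  | [] => true
  | letter :: rest =>
    match PySem.List.remove? text_lst letter with
    | none => false
    | some text_lst' => pvRemoveLoop rest text_lst'

def is_hidden_word_in_text (text : String) (word : String) : Bool :=
  let word_len := word.toList.length
  let text_len := text.toList.length
  if word_len > text_len then false
  else pvRemoveLoop word.toList text.toList

-- ===== PORT B =====
-- all(word.count(c) <= text.count(c) for c in set(word)); s.count(c) for a 1-char c is the
-- character count, ported exactly as List.count over the strings' characters.
def is_hidden_word_in_text_alt (text : String) (word : String) : Bool :=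
  (PySem.Set.ofList word.toList).all
    (fun c => decide (word.toList.count c ≤ text.toList.count c))

-- ===== PRECONDITION & SPEC =====
def Spec_is_hidden_word_in_text (text : String) (word : String) (out : Bool) : Prop := out = is_hidden_word_in_text_alt text word
instance (text : String) (word : String) (out : Bool) : Decidable (Spec_is_hidden_word_in_text text word out) := by unfold Spec_is_hidden_word_in_text; infer_instance

-- ===== CLAIM (what is proved, stated in full; the proofs are below) =====
def Claim_equal_is_hidden_word_in_text : Prop := ∀ (text : String) (word : String), Dom_is_hidden_word_in_text text word → Spec_is_hidden_word_in_text text word (is_hidden_word_in_text text word)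

-- ===== LEMMAS AND PROOFS =====

-- A's remove-loop succeeds exactly when word is a sub-multiset of text (counted per character).
theorem pvRemoveLoop_iff (w : List Char) :
    ∀ t : List Char, pvRemoveLoop w t = true ↔ ∀ c, w.count c ≤ t.count c := by
  induction w with
  | nil => intro t; simp [pvRemoveLoop]
  | cons letter rest ih =>
    intro t
    simp only [pvRemoveLoop]
    by_cases hmem : letter ∈ t
    · rw [PySem.List.remove?_eq_some_erase t letter hmem, ih]
      have hpos : 1 ≤ t.count letter := List.one_le_count_iff.mpr hmem
      constructor
      · intro h c
        have h1 := h c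
        rw [List.count_erase] at h1
        rw [List.count_cons]
        by_cases hc : (letter == c) = true
        · have he : letter = c := beq_iff_eq.mp hc
          rw [he] at hpos
          rw [if_pos hc] at h1; rw [if_pos hc]
          omega
        · rw [if_neg hc] at h1; rw [if_neg hc]
          omega
      · intro h c
        have h1 := h c
        rw [List.count_cons] at h1
        rw [List.count_erase]
        by_cases hc : (letter == c) = true
        · rw [if_pos hc] at h1; rw [if_pos hc]
          omega
        · rw [if_neg hc] at h1; rw [if_neg hc]
          omega
    · rw [(PySem.List.remove?_eq_none_iff t letter).mpr hmem]
      constructor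
      · intro h; exact absurd h (by simp)
      · intro h
        have hc := h letter
        have h0 : t.count letter = 0 := List.count_eq_zero.mpr hmem
        rw [List.count_cons, h0] at hc
        simp at hc

-- B is the same sub-multiset test (chars not in word have count 0 on the left).
theorem alt_iff (text word : String) :
    is_hidden_word_in_text_alt text word = true ↔
      ∀ c, word.toList.count c ≤ text.toList.count c := by
  unfold is_hidden_word_in_text_alt
  rw [List.all_eq_true]
  constructor
  · intro h c
    by_cases hc : c ∈ word.toList
    · have := h c ((PySem.Set.mem_ofList word.toList c).mpr hc)
      simpa using this
    · simp [List.count_eq_zero.mpr hc]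
  · intro h c _
    simpa using h c

-- sub-multiset containment forces the length guard to be vacuous
theorem length_le_of_counts (w t : List Char) (h : ∀ c, w.count c ≤ t.count c) :
    w.length ≤ t.length := by
  have hm : (w : Multiset Char) ≤ (t : Multiset Char) := by
    rw [Multiset.le_iff_count]
    intro a
    simpa using h a
  simpa using Multiset.card_le_card hm

-- ===== VERDICT (by name: the statement is the Claim_ definition above) =====
theorem is_hidden_word_in_text_spec : Claim_equal_is_hidden_word_in_text := by
  intro text word _
  unfold Spec_is_hidden_word_in_text is_hidden_word_in_text
  by_cases hlen : word.toList.length > text.toList.length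
  · simp only [hlen, if_true]
    symm
    rw [← Bool.not_eq_true, alt_iff]
    intro h
    exact absurd (length_le_of_counts _ _ h) (by omega)
  · simp only [hlen, if_false]
    rw [Bool.eq_iff_iff, pvRemoveLoop_iff, alt_iff]
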